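-- pv_equiv track=rewrite | github.com/JinnZ2/Hardware-Store | Bits/key-cutter.py | _char_to_pins
-- ===== SOURCE A (Python) =====
-- def _pins_per_char(depth_range):
--     """How many pins needed to encode one ASCII character (up to 126)."""
--     lo, hi = depth_range
--     base = hi - lo + 1
--     n = 1
--     while base ** n < 127:
--         n += 1
--     return n
--
-- def _char_to_pins(ch, depth_range):
--     """
--     Map a character to pin depths within the key blank's range.
--
--     Uses enough pins per character for full printable ASCII coverage.
--     Encodes as mixed-radix digits: code = d[0]*base^(n-1) + ... + d[n-1].
--     """
--     lo, hi = depth_range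
--     base = hi - lo + 1
--     n = _pins_per_char(depth_range)
--     code = ord(ch)
--     digits = []
--     for _ in range(n):
--         digits.append(lo + code % base)
--         code //= base
--     return list(reversed(digits))
-- ===== SOURCE B (Python) =====
-- def _pins_per_char(depth_range):
--     """How many pins needed to encode one ASCII character (up to 126)."""
--     lo, hi = depth_range
--     base = hi - lo + 1
--     n = 1
--     while base ** n < 127:
--         n += 1
--     return n
--
-- def _char_to_pins(ch, depth_range):
--     """Map a character to pin depths: recursive mixed-radix extraction,
--     building the digit list back-to-front (no accumulator, no reversal)."""
--     lo, hi = depth_range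
--     base = hi - lo + 1
--
--     def digits(code, k):
--         if k == 0:
--             return []
--         q, r = divmod(code, base)
--         return digits(q, k - 1) + [lo + r]
--
--     return digits(ord(ch), _pins_per_char(depth_range))
-- ===== Notes on version B (the rewrite author's own statement) =====
-- stated objective: alternative
-- what changed: B replaces A's LSB-first loop with a mutable digit list and a final reversed() by a recursion that extracts (q, r) = divmod once per step and builds the digit list back-to-front, so no accumulator list and no reversal are needed.
import Mathlib
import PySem

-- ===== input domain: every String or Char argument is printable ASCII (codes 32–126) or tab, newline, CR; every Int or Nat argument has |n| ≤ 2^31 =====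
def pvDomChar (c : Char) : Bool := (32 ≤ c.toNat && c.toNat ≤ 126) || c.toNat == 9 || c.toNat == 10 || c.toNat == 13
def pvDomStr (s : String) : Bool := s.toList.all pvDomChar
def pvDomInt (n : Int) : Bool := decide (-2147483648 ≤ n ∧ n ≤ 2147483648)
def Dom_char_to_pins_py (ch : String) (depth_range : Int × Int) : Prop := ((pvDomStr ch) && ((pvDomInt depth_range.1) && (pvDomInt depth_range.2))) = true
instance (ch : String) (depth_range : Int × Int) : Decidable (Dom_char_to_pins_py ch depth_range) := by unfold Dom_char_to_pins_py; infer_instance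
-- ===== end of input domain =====

-- B extracts mixed-radix digits by recursion with divmod, building the list back-to-front
-- instead of A's accumulate-LSB-then-reverse loop (alternative decomposition, same cost).


-- ===== PORT A =====
-- 'while base ** n < 127: n += 1' — fuel guard only makes the loop total; inside
-- Pre_ (|base| ≥ 2) the loop stops after at most 8 steps, so fuel 64 is never hit.
def pinsLoop (base : Int) : Nat → Int → Int
  | 0, n => n
  | fuel + 1, n => if base ^ n.toNat < 127 then pinsLoop base fuel (n + 1) else n

def pins_per_char (depth_range : Int × Int) : Int :=
  let lo := depth_range.1
  let hi := depth_range.2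
  let base := hi - lo + 1
  pinsLoop base 64 1

-- the 'for _ in range(n)' loop over the state (digits, code)
def loopA (lo base : Int) : Nat → List Int × Int → List Int × Int
  | 0, st => st
  | k + 1, st =>
      loopA lo base k (st.1 ++ [lo + PySem.Int.mod st.2 base], PySem.Int.floordiv st.2 base)

def char_to_pins_py (ch : String) (depth_range : Int × Int) : List Int :=
  let lo := depth_range.1
  let hi := depth_range.2
  let base := hi - lo + 1
  let n := pins_per_char depth_range
  -- ord(ch): raises unless ch is a single character; those inputs are outside Pre_
  let code : Int := match ch.toList with | [c] => (c.toNat : Int) | _ => 0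
  (loopA lo base n.toNat ([], code)).1.reverse

-- ===== PORT B =====
def pinsLoopAlt (base : Int) (fuel : Nat) (n : Int) : Int :=
  if _h : fuel = 0 then n
  else if base ^ n.toNat < 127 then pinsLoopAlt base (fuel - 1) (n + 1) else n
  termination_by fuel
  decreasing_by omega

def pins_per_char_alt (depth_range : Int × Int) : Int :=
  let lo := depth_range.1
  let hi := depth_range.2
  let base := hi - lo + 1
  pinsLoopAlt base 64 1

-- ord(ch) for B (single-character string; outside Pre_ inputs give 0)
def pyOrdAlt (ch : String) : Int :=
  match ch.toList with
  | [] => 0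
  | c :: rest => if rest.isEmpty then (c.toNat : Int) else 0

-- 'def digits(code, k)': recursion building the digit list back-to-front
def digitsRec (lo base : Int) : Int → Nat → List Int
  | _, 0 => []
  | code, k + 1 =>
      digitsRec lo base (PySem.Int.floordiv code base) k ++ [lo + PySem.Int.mod code base]

def char_to_pins_py_alt (ch : String) (depth_range : Int × Int) : List Int :=
  let lo := depth_range.1
  let hi := depth_range.2
  let base := hi - lo + 1
  digitsRec lo base (pyOrdAlt ch) (pins_per_char_alt depth_range).toNat

-- ===== PRECONDITION & SPEC =====
-- Pre_ excludes inputs where Python A raises or diverges: ord(ch) raises TypeError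
-- unless ch has exactly one character, and _pins_per_char loops forever when
-- base = hi - lo + 1 is in {-1, 0, 1}.
def Pre_char_to_pins_py (ch : String) (depth_range : Int × Int) : Prop :=
  ch.toList.length = 1 ∧
    (2 ≤ depth_range.2 - depth_range.1 + 1 ∨ depth_range.2 - depth_range.1 + 1 ≤ -2)
instance (ch : String) (depth_range : Int × Int) : Decidable (Pre_char_to_pins_py ch depth_range) := by
  unfold Pre_char_to_pins_py; infer_instance

def pvWitness_char_to_pins_py : String × (Int × Int) := ("A", (0, 9))

def Spec_char_to_pins_py (ch : String) (depth_range : Int × Int) (out : List Int) : Prop := out = char_to_pins_py_alt ch depth_range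
instance (ch : String) (depth_range : Int × Int) (out : List Int) : Decidable (Spec_char_to_pins_py ch depth_range out) := by unfold Spec_char_to_pins_py; infer_instance

-- ===== CLAIM (what is proved, stated in full; the proofs are below) =====
def Claim_equal_char_to_pins_py : Prop := ∀ (ch : String) (depth_range : Int × Int), Dom_char_to_pins_py ch depth_range → Pre_char_to_pins_py ch depth_range → Spec_char_to_pins_py ch depth_range (char_to_pins_py ch depth_range)

-- ===== LEMMAS AND PROOFS =====

-- the two copies of the pin-count loop agree
theorem pinsLoopAlt_eq (base : Int) (fuel : Nat) :
    ∀ n, pinsLoopAlt base fuel n = pinsLoop base fuel n := by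
  induction fuel with
  | zero => intro n; simp [pinsLoop, pinsLoopAlt]
  | succ fuel ih => intro n; rw [pinsLoopAlt]; simp [pinsLoop, ih]

-- A's loop produces exactly the reverse of B's recursion, prefixed by the accumulator.
theorem loopA_fst (lo base : Int) (k : Nat) :
    ∀ (ds : List Int) (code : Int),
      (loopA lo base k (ds, code)).1 = ds ++ (digitsRec lo base code k).reverse := by
  induction k with
  | zero => intro ds code; simp [loopA, digitsRec]
  | succ k ih =>
      intro ds code
      simp [loopA, digitsRec, ih, List.append_assoc]

-- ===== VERDICT (by name: the statement is the Claim_ definition above) =====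
theorem char_to_pins_py_spec : Claim_equal_char_to_pins_py := by
  intro ch dr _ _
  unfold Spec_char_to_pins_py char_to_pins_py char_to_pins_py_alt pins_per_char pins_per_char_alt
  simp [loopA_fst, pinsLoopAlt_eq, pyOrdAlt]
  rcases ch.toList with _ | ⟨c, _ | ⟨d, t⟩⟩ <;> simp
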